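-- pv_equiv track=rewrite | github.com/hamfan524/Algorithm | 프로그래머스/lv1/92334. 신고 결과 받기/신고 결과 받기.py | solution
-- ===== SOURCE A (Python) =====
-- from collections import defaultdict
--
-- def solution(id_list, report, k):
--     answer = []
--     user = defaultdict(set)
--     cnt = defaultdict(int)
--
--     for r in list(set(report)):
--         a, b = r.split()
--         user[a].add(b)
--         cnt[b] += 1
--
--     for i in id_list:
--         result = 0
--         for u in user[i]:
--             if cnt[u] >= k:
--                 result += 1
--         answer.append(result)
--
--     return answer
-- ===== SOURCE B (Python) =====
-- def solution(id_list, report, k):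
--     # Invert the map: group distinct report strings by reportee, then scan only the
--     # banned reportees, crediting each of their reporters once.
--     reporters = {}   # reportee -> set of reporters
--     cnt = {}         # reportee -> number of distinct report strings naming it
--     for r in set(report):
--         a, b = r.split()
--         reporters.setdefault(b, set()).add(a)
--         cnt[b] = cnt.get(b, 0) + 1
--     results = {}
--     for b, reps in reporters.items():
--         if cnt.get(b, 0) >= k:
--             for a in reps:
--                 results[a] = results.get(a, 0) + 1
--     return [results.get(i, 0) for i in id_list]
-- ===== Notes on version B (the rewrite author's own statement) =====
-- stated objective: alternative
-- what changed: B inverts the data layout: instead of indexing reporter->set(reportees) and scanning each id's reportees against the count table, it groups distinct reports by reportee, scans only the banned reportees crediting each of their reporters once in a results dict, and reads the answer off by lookup.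
-- outside the precondition, e.g. on solution(['a'], ['a'], 1): A raises ValueError, B raises ValueError
import Mathlib
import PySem

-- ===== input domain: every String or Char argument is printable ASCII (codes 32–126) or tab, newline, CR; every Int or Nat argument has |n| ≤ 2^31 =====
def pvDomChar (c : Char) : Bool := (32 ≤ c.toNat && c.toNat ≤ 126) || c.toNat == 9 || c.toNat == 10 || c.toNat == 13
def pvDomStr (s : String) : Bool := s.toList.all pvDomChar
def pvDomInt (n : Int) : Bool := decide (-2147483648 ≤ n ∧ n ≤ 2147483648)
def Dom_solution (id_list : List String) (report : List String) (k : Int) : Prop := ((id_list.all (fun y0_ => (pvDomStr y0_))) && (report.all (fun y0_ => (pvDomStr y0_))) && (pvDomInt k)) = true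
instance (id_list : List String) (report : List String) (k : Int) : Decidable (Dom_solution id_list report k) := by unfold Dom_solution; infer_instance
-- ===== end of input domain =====

-- B regroups the deduped reports by reportee and scans only the banned reportees,
-- crediting each of their reporters in a results dict; same return value as A (alternative decomposition).

-- ===== PORT A =====
-- 'a, b = r.split()': the two words of a report. Under Pre_solution split₀ r has exactly
-- two words, so getD's defaults are never used (Python raises ValueError otherwise).
def pvA (r : String) : String := (PySem.Str.split₀ r).getD 0 ""
def pvB (r : String) : String := (PySem.Str.split₀ r).getD 1 ""

-- for r in list(set(report)): a, b = r.split(); user[a].add(b); cnt[b] += 1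
-- for i in id_list: result = 0; for u in user[i]: if cnt[u] >= k: result += 1; answer.append(result)
-- (defaultdict: user[i] on a missing key holds an empty set — getD i []; cnt[u] — getD u 0)
def solution (id_list : List String) (report : List String) (k : Int) : List Int :=
  let st := (PySem.Set.ofList report).foldl
    (fun (st : PySem.Dict String (PySem.Set String) × PySem.Dict String Int) r =>
      (st.1.modify (pvA r) [] (fun s => PySem.Set.add s (pvB r)),
       st.2.modify (pvB r) 0 (· + 1)))
    (PySem.Dict.empty, PySem.Dict.empty)
  id_list.map (fun i =>
    (st.1.getD i []).foldl
      (fun result u => if st.2.getD u 0 ≥ k then result + 1 else result) (0 : Int))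

-- ===== PORT B =====
-- for r in set(report): a, b = r.split(); reporters.setdefault(b, set()).add(a); cnt[b] = cnt.get(b, 0) + 1
-- for b, reps in reporters.items(): if cnt.get(b, 0) >= k: for a in reps: results[a] = results.get(a, 0) + 1
-- return [results.get(i, 0) for i in id_list]
def solution_alt (id_list : List String) (report : List String) (k : Int) : List Int :=
  let st := (PySem.Set.ofList report).foldl
    (fun (st : PySem.Dict String (PySem.Set String) × PySem.Dict String Int) r =>
      (st.1.modify (pvB r) [] (fun s => PySem.Set.add s (pvA r)),
       st.2.insert (pvB r) (st.2.getD (pvB r) 0 + 1)))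
    (PySem.Dict.empty, PySem.Dict.empty)
  let results := st.1.items.foldl
    (fun (results : PySem.Dict String Int) p =>
      if st.2.getD p.1 0 ≥ k then
        p.2.foldl (fun results a => results.insert a (results.getD a 0 + 1)) results
      else results)
    PySem.Dict.empty
  id_list.map (fun i => results.getD i 0)

-- ===== PRECONDITION & SPEC =====
-- Pre_ excludes exactly the inputs where 'a, b = r.split()' raises ValueError (a report not made of exactly two words).
def Pre_solution (id_list : List String) (report : List String) (k : Int) : Prop :=
  ∀ r ∈ report, (PySem.Str.split₀ r).length = 2
instance (id_list : List String) (report : List String) (k : Int) : Decidable (Pre_solution id_list report k) := by unfold Pre_solution; infer_instance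

def pvWitness_solution : List String × List String × Int :=
  (["muzi", "frodo", "apeach", "neo"],
   ["muzi frodo", "apeach frodo", "frodo neo", "muzi neo", "apeach muzi"], 2)

def Spec_solution (id_list : List String) (report : List String) (k : Int) (out : List Int) : Prop := out = solution_alt id_list report k
instance (id_list : List String) (report : List String) (k : Int) (out : List Int) : Decidable (Spec_solution id_list report k out) := by unfold Spec_solution; infer_instance

-- ===== CLAIM (what is proved, stated in full; the proofs are below) =====
def Claim_equal_solution : Prop := ∀ (id_list : List String) (report : List String) (k : Int), Dom_solution id_list report k → Pre_solution id_list report k → Spec_solution id_list report k (solution id_list report k)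

-- ===== LEMMAS AND PROOFS =====

-- grouping loop 'd[key r].add(val r)', read back at c
theorem pv_group_getD (L : List String) (key val : String → String)
    (d : PySem.Dict String (PySem.Set String)) (c : String) :
    (L.foldl (fun d r => d.modify (key r) [] (fun s => PySem.Set.add s (val r))) d).getD c []
      = PySem.Set.update (d.getD c []) ((L.filter (fun r => key r == c)).map val) := by
  induction L generalizing d with
  | nil => simp [PySem.Set.update]
  | cons r L ih =>
    simp only [List.foldl_cons, ih, List.filter_cons]
    by_cases h : key r = c
    · simp [h, PySem.Set.update_cons]
    · simp [PySem.Dict.getD_modify, h, Ne.symm h]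

-- counting loop 'cnt[key r] += 1' (defaultdict form), read back at u
theorem pv_cnt_modify (L : List String) (key : String → String) (u : String) :
    (L.foldl (fun d r => d.modify (key r) 0 (· + 1)) PySem.Dict.empty).getD u 0
      = ((L.map key).count u : Int) := by
  have h := PySem.Dict.getD_foldl_modify_add_one (L.map key) PySem.Dict.empty u
  rw [List.foldl_map] at h
  simpa using h

-- counting loop 'cnt[key r] = cnt.get(key r, 0) + 1', read back at u
theorem pv_cnt_insert (L : List String) (key : String → String) (u : String) :
    (L.foldl (fun d r => d.insert (key r) (d.getD (key r) 0 + 1)) PySem.Dict.empty).getD u 0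
      = ((L.map key).count u : Int) := by
  have h := PySem.Dict.getD_foldl_insert_add_one (L.map key) PySem.Dict.empty u
  rw [List.foldl_map] at h
  simpa using h

-- results loop of B: getD i of the banned-side accumulation
theorem pv_results_getD (items : List (String × PySem.Set String)) (cnt : PySem.Dict String Int)
    (k : Int) (res : PySem.Dict String Int) (i : String) :
    (items.foldl (fun res p =>
        if cnt.getD p.1 0 ≥ k then
          p.2.foldl (fun res a => res.insert a (res.getD a 0 + 1)) res
        else res) res).getD i 0
      = res.getD i 0 + ((items.filter (fun p => decide (cnt.getD p.1 0 ≥ k))).map (fun p => (p.2.count i : Int))).sum := by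
  induction items generalizing res with
  | nil => simp
  | cons p items ih =>
    simp only [List.foldl_cons, ih, List.filter_cons]
    by_cases h : cnt.getD p.1 0 ≥ k
    · simp only [h, if_pos, decide_true, PySem.Dict.getD_foldl_insert_add_one, List.map_cons, List.sum_cons]
      ring
    · simp [h]

-- a sum of per-set occurrence counts of i over nodup sets is a countP of membership
theorem pv_sum_count (K : List String) (g : String → List String) (i : String)
    (hg : ∀ u, (g u).Nodup) :
    (K.map (fun u => ((g u).count i : Int))).sum = (K.countP (fun u => decide (i ∈ g u)) : Int) := by
  induction K with
  | nil => simp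
  | cons u K ih =>
    simp only [List.map_cons, List.sum_cons, ih, List.countP_cons]
    by_cases h : i ∈ g u
    · rw [List.count_eq_one_of_mem (hg u) h]
      simp [h]
      ring
    · rw [List.count_eq_zero_of_not_mem h]
      simp [h]

-- the double-counting argument: counting i's banned reportees (A) equals counting
-- banned reportees whose reporter set contains i (B)
theorem pv_main_count (D : List String) (pa pb : String → String) (i : String) (p : String → Bool) :
    (PySem.Set.ofList ((D.filter (fun r => pa r == i)).map pb)).countP p
      = ((PySem.Set.ofList (D.map pb)).filter p).countP
          (fun u => decide (i ∈ PySem.Set.ofList ((D.filter (fun r => pb r == u)).map pa))) := by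
  rw [List.countP_eq_length_filter, List.countP_eq_length_filter]
  refine List.Perm.length_eq ?_
  refine (List.perm_ext_iff_of_nodup ((PySem.Set.nodup_ofList _).filter _)
    (((PySem.Set.nodup_ofList _).filter _).filter _)).2 ?_
  intro u
  simp only [List.mem_filter, PySem.Set.mem_ofList, List.mem_map, List.mem_filter, beq_iff_eq,
    decide_eq_true_eq]
  constructor
  · rintro ⟨⟨r, ⟨hrD, hpa⟩, hpb⟩, hp⟩
    exact ⟨⟨⟨r, hrD, hpb⟩, hp⟩, r, ⟨hrD, hpb⟩, hpa⟩
  · rintro ⟨⟨_, hp⟩, r, ⟨hrD, hpb⟩, hpa⟩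
    exact ⟨⟨r, ⟨hrD, hpa⟩, hpb⟩, hp⟩

-- ===== VERDICT (by name: the statement is the Claim_ definition above) =====
theorem solution_spec : Claim_equal_solution := by
  intro id_list report k hdom hpre
  unfold Spec_solution solution solution_alt
  rw [PySem.List.foldl_prod_mk
        (f := fun (d : PySem.Dict String (PySem.Set String)) r => d.modify (pvA r) [] (fun s => PySem.Set.add s (pvB r)))
        (g := fun (d : PySem.Dict String Int) r => d.modify (pvB r) 0 (· + 1)),
      PySem.List.foldl_prod_mk
        (f := fun (d : PySem.Dict String (PySem.Set String)) r => d.modify (pvB r) [] (fun s => PySem.Set.add s (pvA r)))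
        (g := fun (d : PySem.Dict String Int) r => d.insert (pvB r) (d.getD (pvB r) 0 + 1))]
  simp only []
  have hRnodup : ((PySem.Set.ofList report).foldl (fun d r => d.modify (pvB r) [] (fun s => PySem.Set.add s (pvA r))) PySem.Dict.empty).keys.Nodup :=
    PySem.Dict.nodup_keys_foldl_modify_key (PySem.Set.ofList report) pvB [] (fun _ r => fun s => PySem.Set.add s (pvA r)) PySem.Dict.empty (by simp)
  rw [PySem.Dict.items_eq_map_keys _ hRnodup []]
  rw [PySem.Dict.keys_foldl_modify_key (PySem.Set.ofList report) pvB [] (fun _ r => fun s => PySem.Set.add s (pvA r))]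
  simp only [PySem.Dict.keys_empty, PySem.Set.update_nil_left, pv_results_getD]
  simp only [List.filter_map, List.map_map, pv_group_getD, PySem.Dict.getD_empty,
    pv_cnt_modify, pv_cnt_insert, PySem.Set.update_nil_left, zero_add]
  simp only [Function.comp_def]
  refine List.map_congr_left ?_
  intro i hi
  rw [PySem.List.foldl_ite_add_one (p := fun u => ((List.map pvB (PySem.Set.ofList report)).count u : Int) ≥ k)]
  rw [pv_sum_count _ _ i (fun u => PySem.Set.nodup_ofList _)]
  rw [zero_add]
  exact congrArg Nat.cast (pv_main_count (PySem.Set.ofList report) pvA pvB i _)
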